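-- pv_equiv track=rewrite | github.com/yannickloth/W33-Theory | tools/h27_triplet_structure.py | basis_coords
-- ===== SOURCE A (Python) =====
-- def row_reduce_mod3(mat):
--     m = [list(row) for row in mat]
--     n_rows = len(m)
--     n_cols = len(m[0]) if n_rows else 0
--     rank = 0
--     col = 0
--     pivots = []
--     while rank < n_rows and col < n_cols:
--         pivot = None
--         for r in range(rank, n_rows):
--             if m[r][col] % 3 != 0:
--                 pivot = r
--                 break
--         if pivot is None:
--             col += 1
--             continue
--         m[rank], m[pivot] = m[pivot], m[rank]
--         inv = 1 if m[rank][col] == 1 else 2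
--         m[rank] = [(inv * x) % 3 for x in m[rank]]
--         for r in range(n_rows):
--             if r == rank:
--                 continue
--             factor = m[r][col] % 3
--             if factor != 0:
--                 m[r] = [(m[r][c] - factor * m[rank][c]) % 3 for c in range(n_cols)]
--         pivots.append(col)
--         rank += 1
--         col += 1
--     return rank, m, pivots
--
-- def basis_coords(points):
--     """Express points in an F3^2 basis for their affine span."""
--     base = points[0]
--     diffs = [[(p[i] - base[i]) % 3 for i in range(4)] for p in points[1:]]
--     rank, rref, pivots = row_reduce_mod3(diffs)
--     # choose two independent diff vectors as basis
--     basis = []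
--     for row in diffs:
--         if len(basis) == 0:
--             basis.append(row)
--         else:
--             mat = basis + [row]
--             if row_reduce_mod3(mat)[0] > len(basis):
--                 basis.append(row)
--         if len(basis) == 2:
--             break
--     if len(basis) < 2:
--         return None, None
--     b1, b2 = basis
--
--     # solve for each point p: p = base + s*b1 + t*b2
--     coords = {}
--     for p in points:
--         target = [(p[i] - base[i]) % 3 for i in range(4)]
--         # brute force solve s,t in F3
--         found = None
--         for s in [0, 1, 2]:
--             for t in [0, 1, 2]:
--                 cand = [(s * b1[i] + t * b2[i]) % 3 for i in range(4)]
--                 if cand == target: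
--                     found = (s, t)
--                     break
--             if found is not None:
--                 break
--         coords[p] = found
--     return (base, b1, b2), coords
-- ===== SOURCE B (Python) =====
-- def basis_coords(points):
--     """Express points in an F3^2 basis for their affine span."""
--     base = points[0]
--     diffs = [[(p[i] - base[i]) % 3 for i in range(4)] for p in points[1:]]
--     if not diffs:
--         return None, None
--     # basis: first diff row, then first later row with a nonzero 2x2 minor mod 3
--     # (over the field F3 a 2-row matrix has rank 2 iff some 2x2 minor is nonzero,
--     # which is exactly A's greedy rank test)
--     b1 = diffs[0]
--     b2 = next((row for row in diffs[1:]
--                if any((b1[i] * row[j] - b1[j] * row[i]) % 3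
--                       for i in range(4) for j in range(4))), None)
--     if b2 is None:
--         return None, None
--     # all nine span vectors precomputed once; first insertion (lexicographically
--     # smallest (s, t)) wins, as in A's brute-force scan
--     table = {}
--     for s in (0, 1, 2):
--         for t in (0, 1, 2):
--             table.setdefault(tuple((s * b1[i] + t * b2[i]) % 3 for i in range(4)), (s, t))
--     coords = {}
--     for p in points:
--         coords[p] = table.get(tuple((p[i] - base[i]) % 3 for i in range(4)))
--     return (base, b1, b2), coords
-- ===== Notes on version B (the rewrite author's own statement) =====
-- stated objective: alternative
-- what changed: B removes the Gaussian elimination (row_reduce_mod3) entirely: the basis is the first diff row plus the first later diff row having a nonzero 2x2 minor mod 3 (equivalent to A's rank-2 test over the field F3), and per-point coordinates come from a nine-entry span table built once with setdefault (first insertion = A's lexicographic scan order) instead of A's per-point brute-force search over the nine (s,t) pairs; A's unused top-level row_reduce_mod3(diffs) call is dropped.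
import Mathlib
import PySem

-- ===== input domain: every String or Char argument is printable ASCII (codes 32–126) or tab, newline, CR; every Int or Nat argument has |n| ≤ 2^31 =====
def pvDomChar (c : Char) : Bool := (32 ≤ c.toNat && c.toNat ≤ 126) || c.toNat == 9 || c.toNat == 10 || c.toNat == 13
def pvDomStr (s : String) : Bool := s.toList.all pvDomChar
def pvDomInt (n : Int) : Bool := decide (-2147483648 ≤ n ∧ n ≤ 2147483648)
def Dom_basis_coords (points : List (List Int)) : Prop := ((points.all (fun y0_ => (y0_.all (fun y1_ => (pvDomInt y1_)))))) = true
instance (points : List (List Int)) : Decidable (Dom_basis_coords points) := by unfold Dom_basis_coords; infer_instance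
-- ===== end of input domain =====

-- B drops the Gaussian elimination entirely: the basis is the first diff row plus the
-- first later row with a nonzero 2x2 minor mod 3, and coordinates come from a
-- nine-entry span table built once instead of a per-point brute-force scan (alternative).

-- ===== PORT A =====
-- first r in range(rank, n_rows) with m[r][col] % 3 != 0
def pvFindPivot (m : List (List Int)) (rank nRows col : Nat) : Option Nat :=
  (List.range' rank (nRows - rank)).find? (fun r => PySem.Int.mod ((m.getD r []).getD col 0) 3 != 0)

-- the inner elimination loop 'for r in range(n_rows): ...'
def pvElim (m : List (List Int)) (rank : Nat) (prow : List Int) (col nRows nCols : Nat) : List (List Int) :=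
  (List.range nRows).foldl (fun acc r =>
    if r = rank then acc
    else
      let factor := PySem.Int.mod ((acc.getD r []).getD col 0) 3
      if factor ≠ 0 then
        acc.set r ((List.range nCols).map
          (fun c => PySem.Int.mod ((acc.getD r []).getD c 0 - factor * prow.getD c 0) 3))
      else acc) m

-- the while loop; fuel = number of remaining columns (col increases every iteration)
def pvRRLoop (nRows nCols : Nat) : Nat → List (List Int) → Nat → Nat → List Nat → Nat × List (List Int) × List Nat
  | 0, m, rank, _col, piv => (rank, m, piv)
  | fuel+1, m, rank, col, piv =>
    if rank < nRows ∧ col < nCols then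
      match pvFindPivot m rank nRows col with
      | none => pvRRLoop nRows nCols fuel m rank (col+1) piv
      | some p =>
        let m1 := (m.set rank (m.getD p [])).set p (m.getD rank [])
        let inv : Int := if (m1.getD rank []).getD col 0 = 1 then 1 else 2
        let prow := (m1.getD rank []).map (fun x => PySem.Int.mod (inv * x) 3)
        let m2 := m1.set rank prow
        let m3 := pvElim m2 rank prow col nRows nCols
        pvRRLoop nRows nCols fuel m3 (rank+1) (col+1) (piv ++ [col])
    else (rank, m, piv)

def row_reduce_mod3 (mat : List (List Int)) : Nat × List (List Int) × List Nat :=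
  let nRows := mat.length
  let nCols := if nRows ≠ 0 then (mat.getD 0 []).length else 0
  pvRRLoop nRows nCols nCols mat 0 0 []

-- [(p[i] - base[i]) % 3 for i in range(4)]  (rows shorter than 4 raise IndexError in
-- Python and are excluded by Pre_; getD's default is never used inside Pre_)
def pvDiffRow (base p : List Int) : List Int :=
  (List.range 4).map (fun i => PySem.Int.mod (p.getD i 0 - base.getD i 0) 3)

-- A's greedy basis-selection loop over diffs
def pvSelect : List (List Int) → List (List Int) → List (List Int)
  | [], basis => basis
  | row :: rest, basis =>
    let basis' :=
      if basis.length = 0 then basis ++ [row]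
      else if basis.length < (row_reduce_mod3 (basis ++ [row])).1 then basis ++ [row]
      else basis
    if basis'.length = 2 then basis' else pvSelect rest basis'

-- A's brute-force solve: first (s, t) in lexicographic order with s*b1 + t*b2 = target (mod 3)
def pvBrute (b1 b2 target : List Int) : Option (Int × Int) :=
  ([0, 1, 2] : List Int).findSome? (fun s =>
    ([0, 1, 2] : List Int).findSome? (fun t =>
      if (List.range 4).map (fun i => PySem.Int.mod (s * b1.getD i 0 + t * b2.getD i 0) 3) = target
      then some (s, t) else none))

def basis_coords (points : List (List Int)) : (Option (List Int × List Int × List Int)) × (Option (List (List Int × Option (Int × Int)))) :=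
  match points with
  | [] => (none, none)   -- Python raises IndexError on points[0]; excluded by Pre_
  | base :: rest =>
    let diffs := rest.map (pvDiffRow base)
    let _rrp := row_reduce_mod3 diffs   -- rank, rref, pivots: computed and unused, as in A
    let basis := pvSelect diffs []
    if basis.length < 2 then (none, none)
    else
      let b1 := basis.getD 0 []
      let b2 := basis.getD 1 []
      let coords := (base :: rest).foldl
        (fun (d : PySem.Dict (List Int) (Option (Int × Int))) p =>
          d.insert p (pvBrute b1 b2 (pvDiffRow base p))) PySem.Dict.empty
      (some (base, b1, b2), some coords.items)

-- ===== PORT B =====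
-- B's diff row (the same comprehension appears literally in Source B)
def pvRow3 (base p : List Int) : List Int :=
  (List.range 4).map (fun i => PySem.Int.mod (p.getD i 0 - base.getD i 0) 3)

-- any((b1[i]*row[j] - b1[j]*row[i]) % 3 for i in range(4) for j in range(4))
-- (Python truthiness of an int: nonzero)
def pvMinorNZ (b1 row : List Int) : Bool :=
  ((List.range 4).flatMap (fun i => (List.range 4).map (fun j => (i, j)))).any
    (fun ij => PySem.Int.mod (b1.getD ij.1 0 * row.getD ij.2 0 - b1.getD ij.2 0 * row.getD ij.1 0) 3 != 0)

-- for s in (0,1,2): for t in (0,1,2): table.setdefault(span_vec(s,t), (s,t))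
def pvTable (b1 b2 : List Int) : PySem.Dict (List Int) (Int × Int) :=
  ([0, 1, 2] : List Int).foldl (fun d s =>
    ([0, 1, 2] : List Int).foldl (fun d t =>
      d.setdefault ((List.range 4).map (fun i => PySem.Int.mod (s * b1.getD i 0 + t * b2.getD i 0) 3)) (s, t)) d)
    PySem.Dict.empty

def basis_coords_alt (points : List (List Int)) : (Option (List Int × List Int × List Int)) × (Option (List (List Int × Option (Int × Int)))) :=
  match points with
  | [] => (none, none)   -- Python raises IndexError on points[0]; excluded by Pre_
  | base :: rest =>
    match rest.map (pvRow3 base) with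
    | [] => (none, none)                      -- 'if not diffs'
    | b1 :: others =>
      match others.find? (pvMinorNZ b1) with  -- next((row for row in diffs[1:] if ...), None)
      | none => (none, none)
      | some b2 =>
        let table := pvTable b1 b2
        let coords := (base :: rest).foldl
          (fun (d : PySem.Dict (List Int) (Option (Int × Int))) p =>
            d.insert p (table.get? (pvRow3 base p))) PySem.Dict.empty
        (some (base, b1, b2), some coords.items)

-- ===== PRECONDITION & SPEC =====
-- Pre_ excludes exactly the inputs on which Python A raises IndexError: the empty list
-- (points[0]) and, when there are at least two points, any point shorter than 4
-- (p[i] / base[i] for i in range(4)). A returns normally everywhere else.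
def Pre_basis_coords (points : List (List Int)) : Prop :=
  points ≠ [] ∧ (points.tail = [] ∨ ∀ p ∈ points, 4 ≤ p.length)
instance (points : List (List Int)) : Decidable (Pre_basis_coords points) := by
  unfold Pre_basis_coords; infer_instance

def pvWitness_basis_coords : List (List Int) := [[0, 0, 0, 0], [1, 0, 0, 0], [0, 1, 0, 0]]

def Spec_basis_coords (points : List (List Int)) (out : (Option (List Int × List Int × List Int)) × (Option (List (List Int × Option (Int × Int))))) : Prop := out = basis_coords_alt points
instance (points : List (List Int)) (out : (Option (List Int × List Int × List Int)) × (Option (List (List Int × Option (Int × Int))))) : Decidable (Spec_basis_coords points out) := by unfold Spec_basis_coords; infer_instance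

-- ===== CLAIM (what is proved, stated in full; the proofs are below) =====
def Claim_equal_basis_coords : Prop := ∀ (points : List (List Int)), Dom_basis_coords points → Pre_basis_coords points → Spec_basis_coords points (basis_coords points)

-- ===== LEMMAS AND PROOFS =====

-- all 81 rows of length 4 with entries in {0,1,2}
def pvRows4 : List (List Int) :=
  ([0,1,2] : List Int).flatMap (fun a => ([0,1,2] : List Int).flatMap (fun b =>
    ([0,1,2] : List Int).flatMap (fun c => ([0,1,2] : List Int).map (fun d => [a,b,c,d]))))

-- over F3, a 2x4 matrix has rank 2 iff some 2x2 minor is nonzero (finite check)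
set_option maxHeartbeats 4000000 in
theorem pv_rank_iff_minor_all :
    (pvRows4.all (fun a => pvRows4.all (fun b =>
      decide (1 < (row_reduce_mod3 [a, b]).1) == pvMinorNZ a b))) = true := by decide

theorem pv_rank_iff_minor {a b : List Int} (ha : a ∈ pvRows4) (hb : b ∈ pvRows4) :
    1 < (row_reduce_mod3 [a, b]).1 ↔ pvMinorNZ a b = true := by
  have h := pv_rank_iff_minor_all
  rw [List.all_eq_true] at h
  have h2 := h a ha
  rw [List.all_eq_true] at h2
  have h3 := h2 b hb
  rw [beq_iff_eq] at h3
  constructor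
  · intro hr; rw [← h3]; exact decide_eq_true hr
  · intro hm; exact of_decide_eq_true (h3 ▸ hm)

theorem pv_mod3_mem (x : Int) : PySem.Int.mod x 3 ∈ ([0, 1, 2] : List Int) := by
  have h1 : (0:Int) ≤ PySem.Int.mod x 3 := PySem.Int.mod_nonneg x (by norm_num)
  have h2 : PySem.Int.mod x 3 < 3 := PySem.Int.mod_lt x (by norm_num)
  simp only [List.mem_cons]
  omega

theorem pv_row3_mem (base p : List Int) : pvRow3 base p ∈ pvRows4 := by
  simp only [pvRow3, List.range, List.range.loop, List.map]
  simp only [pvRows4, List.mem_flatMap, List.mem_map]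
  exact ⟨_, pv_mod3_mem _, _, pv_mod3_mem _, _, pv_mod3_mem _, _, pv_mod3_mem _, rfl⟩

theorem pv_row3_eq_diffRow : pvRow3 = pvDiffRow := rfl

-- A's greedy loop, started with one already-chosen row, is a find? for an
-- independent partner (rank test replaced by the minor test)
theorem pv_select_one (others : List (List Int)) (b1 : List Int)
    (hb1 : b1 ∈ pvRows4) (ho : ∀ r ∈ others, r ∈ pvRows4) :
    pvSelect others [b1] =
      (match others.find? (pvMinorNZ b1) with
       | some b2 => [b1, b2]
       | none => [b1]) := by
  induction others with
  | nil => rfl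
  | cons r rest ih =>
    have hr : r ∈ pvRows4 := ho r (List.mem_cons_self)
    have hrest : ∀ x ∈ rest, x ∈ pvRows4 := fun x hx => ho x (List.mem_cons_of_mem _ hx)
    simp only [pvSelect, List.length_cons, List.length_nil, List.find?]
    by_cases hm : pvMinorNZ b1 r = true
    · have hrank : 1 < (row_reduce_mod3 [b1, r]).1 := by
        rw [pv_rank_iff_minor hb1 hr]; exact hm
      simp [hm, hrank]
    · have hrank : ¬ 1 < (row_reduce_mod3 [b1, r]).1 := by
        rw [pv_rank_iff_minor hb1 hr]; simpa using hm
      simp [hm, hrank, ih hrest]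

-- a nested fold over two lists is a fold over the list of pairs
theorem pv_foldl_nested {α : Type} (S T : List Int) (g : α → Int → Int → α) (d : α) :
    S.foldl (fun d s => T.foldl (fun d t => g d s t) d) d
      = (S.flatMap (fun s => T.map (fun t => (s, t)))).foldl (fun d st => g d st.1 st.2) d := by
  induction S generalizing d with
  | nil => rfl
  | cons s S ih =>
    simp only [List.foldl_cons, List.flatMap_cons, List.foldl_append, List.foldl_map, ih]

-- a nested findSome? over two lists is a findSome? over the list of pairs
theorem pv_findSome?_nested {α : Type} (S T : List Int) (f : Int → Int → Option α) :
    S.findSome? (fun s => T.findSome? (fun t => f s t))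
      = (S.flatMap (fun s => T.map (fun t => (s, t)))).findSome? (fun st => f st.1 st.2) := by
  induction S with
  | nil => rfl
  | cons s S ih =>
    simp only [List.findSome?_cons, List.flatMap_cons, List.findSome?_append, List.findSome?_map,
      Function.comp_def, ih]
    cases T.findSome? (fun t => f s t) <;> rfl

-- looking a key up in a setdefault-built table is first-match search over the generators
theorem pv_get?_setdefault_fold (key : Int × Int → List Int) (ps : List (Int × Int))
    (d : PySem.Dict (List Int) (Int × Int)) (target : List Int) :
    (ps.foldl (fun d st => d.setdefault (key st) st) d).get? target
      = (d.get? target).or (ps.findSome? (fun st => if key st = target then some st else none)) := by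
  induction ps generalizing d with
  | nil => simp
  | cons st ps ih =>
    simp only [List.foldl_cons, List.findSome?_cons, ih]
    by_cases h : key st = target
    · subst h
      simp only [PySem.Dict.get?_setdefault_self, if_pos]
      cases d.get? (key st) <;> simp
    · have hne : target ≠ key st := fun he => h he.symm
      rw [PySem.Dict.get?_setdefault_of_ne d st hne, if_neg h]

-- B's table lookup computes exactly A's brute-force answer
theorem pv_table_eq_brute (b1 b2 target : List Int) :
    (pvTable b1 b2).get? target = pvBrute b1 b2 target := by
  unfold pvTable pvBrute
  rw [pv_foldl_nested, pv_findSome?_nested]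
  simp only [Prod.mk.eta]
  rw [pv_get?_setdefault_fold]
  simp

theorem pv_ports_eq (points : List (List Int)) : basis_coords points = basis_coords_alt points := by
  cases points with
  | nil => rfl
  | cons base rest =>
    cases rest with
    | nil => rfl
    | cons p0 rest' =>
      simp only [basis_coords, basis_coords_alt, List.map_cons, ← pv_row3_eq_diffRow]
      have hsel :
          pvSelect (pvRow3 base p0 :: rest'.map (pvRow3 base)) [] =
            (match (rest'.map (pvRow3 base)).find? (pvMinorNZ (pvRow3 base p0)) with
             | some b2 => [pvRow3 base p0, b2]
             | none => [pvRow3 base p0]) := by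
        have h0 : pvSelect (pvRow3 base p0 :: rest'.map (pvRow3 base)) [] =
            pvSelect (rest'.map (pvRow3 base)) [pvRow3 base p0] := by
          simp [pvSelect]
        rw [h0]
        exact pv_select_one _ _ (pv_row3_mem base p0)
          (fun r hr => by
            obtain ⟨q, _, hq⟩ := List.mem_map.mp hr
            exact hq ▸ pv_row3_mem base q)
      rw [hsel]
      cases hf : (rest'.map (pvRow3 base)).find? (pvMinorNZ (pvRow3 base p0)) with
      | none => simp
      | some b2 =>
        simp only [List.length_cons, List.length_nil]
        norm_num
        simp [pv_table_eq_brute]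

-- ===== VERDICT (by name: the statement is the Claim_ definition above) =====
theorem basis_coords_spec : Claim_equal_basis_coords := by
  intro points _hDom _hPre
  unfold Spec_basis_coords
  exact pv_ports_eq points
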